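-- pv_equiv track=rewrite | github.com/Todaime/KBP | src/benchmark/utils.py | get_matching_attrs
-- ===== SOURCE A (Python) =====
-- import copy
--
-- def get_matching_attrs(attrs_a: list, attrs_b: list):
--     """Check attributes in common.
--
--     Args:
--         attrs_a (list): attributes of the first entity
--         attrs_b (list): attributes of the second entity
--
--     Returns:
--         attributes in common, unmatched attributes of a, unmatched attributes of b
--     """
--     tp_attr = []
--     fp_attr = []
--     attrs_a_copy = copy.deepcopy(attrs_a)
--     for attr_b in attrs_b:
--         if attr_b in attrs_a_copy:
--             tp_attr.append(attr_b)
--             attrs_a_copy.remove(attr_b)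
--         else:
--             fp_attr.append(tuple(attr_b))
--     return tp_attr, list(attrs_a_copy), fp_attr
-- ===== SOURCE B (Python) =====
-- def get_matching_attrs(attrs_a: list, attrs_b: list):
--     """Check attributes in common (counter-based, single pass per list)."""
--     rem = {}
--     for attr_a in attrs_a:
--         k = tuple(attr_a)
--         rem[k] = rem.get(k, 0) + 1
--     tp_attr = []
--     fp_attr = []
--     matched = {}
--     for attr_b in attrs_b:
--         k = tuple(attr_b)
--         if rem.get(k, 0) > 0:
--             rem[k] -= 1
--             matched[k] = matched.get(k, 0) + 1
--             tp_attr.append(attr_b)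
--         else:
--             fp_attr.append(k)
--     unmatched_a = []
--     for attr_a in attrs_a:
--         k = tuple(attr_a)
--         if matched.get(k, 0) > 0:
--             matched[k] -= 1
--         else:
--             unmatched_a.append(attr_a)
--     return tp_attr, unmatched_a, fp_attr
-- ===== Notes on version B (the rewrite author's own statement) =====
-- stated objective: faster
-- what changed: Replaces the quadratic membership-test-and-remove loop over a deepcopy of attrs_a with hash counters: one counting pass over attrs_a, one pass over attrs_b decrementing the counter, and one skip pass over attrs_a reconstructing the unmatched attributes.
import Mathlib
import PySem

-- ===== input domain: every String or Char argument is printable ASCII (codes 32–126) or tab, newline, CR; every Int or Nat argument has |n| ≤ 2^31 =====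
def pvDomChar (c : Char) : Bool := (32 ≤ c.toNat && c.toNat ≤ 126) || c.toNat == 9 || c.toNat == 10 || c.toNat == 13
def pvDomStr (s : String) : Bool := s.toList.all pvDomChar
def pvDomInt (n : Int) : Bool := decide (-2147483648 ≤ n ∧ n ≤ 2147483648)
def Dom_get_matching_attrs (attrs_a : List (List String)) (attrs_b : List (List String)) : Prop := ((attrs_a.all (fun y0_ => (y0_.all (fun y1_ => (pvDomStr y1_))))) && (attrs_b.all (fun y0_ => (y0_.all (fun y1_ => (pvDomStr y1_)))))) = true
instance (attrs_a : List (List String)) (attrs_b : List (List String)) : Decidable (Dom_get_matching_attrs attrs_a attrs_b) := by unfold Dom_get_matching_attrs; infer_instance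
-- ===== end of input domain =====

-- B replaces A's quadratic membership-test-and-remove loop with hash counters (one pass per list).

-- ===== PORT A =====
-- literal port of A: deepcopy of attrs_a, then for each attr_b test membership and remove the
-- first equal element (Python list.remove on a present element = List.erase)
def get_matching_attrs (attrs_a : List (List String)) (attrs_b : List (List String)) : List (List String) × List (List String) × List (List String) :=
  let st := attrs_b.foldl
    (fun (st : List (List String) × List (List String) × List (List String)) b =>
      if b ∈ st.2.2 then (st.1 ++ [b], st.2.1, st.2.2.erase b)
      else (st.1, st.2.1 ++ [b], st.2.2))
    ([], [], attrs_a)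
  (st.1, st.2.2, st.2.1)

-- ===== PORT B =====
-- literal port of Source B: build a counter of attrs_a, one pass over attrs_b decrementing it and
-- counting matches, then one skip pass over attrs_a
def get_matching_attrs_alt (attrs_a : List (List String)) (attrs_b : List (List String)) : List (List String) × List (List String) × List (List String) :=
  let rem : PySem.Dict (List String) Int :=
    attrs_a.foldl (fun d a => d.insert a (d.getD a 0 + 1)) PySem.Dict.empty
  let st := attrs_b.foldl
    (fun (st : List (List String) × List (List String) × PySem.Dict (List String) Int × PySem.Dict (List String) Int) b =>
      if st.2.2.1.getD b 0 > 0 then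
        (st.1 ++ [b], st.2.1, st.2.2.1.insert b (st.2.2.1.getD b 0 - 1),
          st.2.2.2.insert b (st.2.2.2.getD b 0 + 1))
      else (st.1, st.2.1 ++ [b], st.2.2.1, st.2.2.2))
    ([], [], rem, PySem.Dict.empty)
  let fin := attrs_a.foldl
    (fun (st : PySem.Dict (List String) Int × List (List String)) a =>
      if st.1.getD a 0 > 0 then (st.1.insert a (st.1.getD a 0 - 1), st.2)
      else (st.1, st.2 ++ [a]))
    (st.2.2.2, [])
  (st.1, fin.2, st.2.1)

-- ===== PRECONDITION & SPEC =====
def Spec_get_matching_attrs (attrs_a : List (List String)) (attrs_b : List (List String)) (out : List (List String) × List (List String) × List (List String)) : Prop := out = get_matching_attrs_alt attrs_a attrs_b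
instance (attrs_a : List (List String)) (attrs_b : List (List String)) (out : List (List String) × List (List String) × List (List String)) : Decidable (Spec_get_matching_attrs attrs_a attrs_b out) := by unfold Spec_get_matching_attrs; infer_instance

-- ===== CLAIM (what is proved, stated in full; the proofs are below) =====
def Claim_equal_get_matching_attrs : Prop := ∀ (attrs_a : List (List String)) (attrs_b : List (List String)), Dom_get_matching_attrs attrs_a attrs_b → Spec_get_matching_attrs attrs_a attrs_b (get_matching_attrs attrs_a attrs_b)

-- ===== LEMMAS AND PROOFS =====

-- pointwise update of a count function
def updF (f : List String → Int) (a : List String) (v : Int) : List String → Int :=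
  fun k => if k = a then v else f k

lemma updF_apply (f : List String → Int) (a : List String) (v : Int) (k : List String) :
    updF f a v k = if k = a then v else f k := rfl

-- the list xs with, for each value k, its first (f k) occurrences removed
def skipFun (f : List String → Int) : List (List String) → List (List String)
  | [] => []
  | a :: t => if f a > 0 then skipFun (updF f a (f a - 1)) t else a :: skipFun f t

lemma getD_insert_fun (m : PySem.Dict (List String) Int) (a : List String) (v : Int) :
    (fun k => (m.insert a v).getD k 0) = updF (fun k => m.getD k 0) a v := by
  funext k
  simp [PySem.Dict.getD_insert, updF]

lemma skipFun_nonpos (xs : List (List String)) (f : List String → Int)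
    (hf : ∀ k, f k ≤ 0) : skipFun f xs = xs := by
  induction xs with
  | nil => rfl
  | cons a t ih =>
    have := hf a
    simp only [skipFun, if_neg (by omega : ¬ f a > 0)]
    exact congrArg (a :: ·) (ih)

lemma skip_foldl (xs : List (List String)) (m : PySem.Dict (List String) Int)
    (acc : List (List String)) :
    (xs.foldl
      (fun (st : PySem.Dict (List String) Int × List (List String)) a =>
        if st.1.getD a 0 > 0 then (st.1.insert a (st.1.getD a 0 - 1), st.2)
        else (st.1, st.2 ++ [a])) (m, acc)).2
      = acc ++ skipFun (fun k => m.getD k 0) xs := by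
  induction xs generalizing m acc with
  | nil => simp [skipFun]
  | cons a t ih =>
    by_cases h : m.getD a 0 > 0
    · simp only [List.foldl_cons, if_pos h, skipFun, ih, getD_insert_fun]
    · simp only [List.foldl_cons, if_neg h, skipFun, ih, List.append_assoc, List.singleton_append]

lemma mem_skipFun (xs : List (List String)) (f : List String → Int)
    (hf : ∀ k, 0 ≤ f k) (b : List String) :
    b ∈ skipFun f xs ↔ f b < (xs.count b : Int) := by
  induction xs generalizing f with
  | nil =>
    simp only [skipFun, List.not_mem_nil, List.count_nil, false_iff]
    have := hf b; omega
  | cons a t ih =>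
    by_cases h : f a > 0
    · have hnn : ∀ k, 0 ≤ updF f a (f a - 1) k := by
        intro k; simp only [updF]; split
        · omega
        · exact hf k
      rw [skipFun, if_pos h, ih _ hnn]
      by_cases hba : b = a
      · subst hba
        simp [updF, List.count_cons]
      · have hab : ¬ a = b := fun h' => hba h'.symm
        simp [updF, hba, List.count_cons, hab]
    · rw [skipFun, if_neg h]
      by_cases hba : b = a
      · subst hba
        have h0 := hf b
        simp [List.count_cons]
        omega
      · have hab : ¬ a = b := fun h' => hba h'.symm
        simp [List.mem_cons, hba, ih _ hf, hab]

lemma erase_skipFun (xs : List (List String)) (f : List String → Int)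
    (hf : ∀ k, 0 ≤ f k) (b : List String) (hb : b ∈ skipFun f xs) :
    (skipFun f xs).erase b = skipFun (updF f b (f b + 1)) xs := by
  induction xs generalizing f with
  | nil => simp [skipFun] at hb
  | cons a t ih =>
    by_cases h : f a > 0
    · have hnn : ∀ k, 0 ≤ updF f a (f a - 1) k := by
        intro k; simp only [updF]; split
        · omega
        · exact hf k
      rw [skipFun, if_pos h] at hb ⊢
      rw [ih _ hnn hb]
      have ha' : updF f b (f b + 1) a > 0 := by
        by_cases hab : a = b
        · subst hab; simp only [updF_apply, if_pos rfl]; have := hf a; omega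
        · simp only [updF, if_neg hab]; exact h
      rw [skipFun, if_pos ha']
      congr 1
      funext k
      simp only [updF_apply]
      split_ifs <;> first | omega | (subst_vars; first | omega | simp_all)
    · rw [skipFun, if_neg h] at hb ⊢
      by_cases hba : b = a
      · subst hba
        rw [List.erase_cons_head]
        have ha' : updF f b (f b + 1) b > 0 := by
          have := hf b; simp [updF]; omega
        rw [skipFun, if_pos ha']
        congr 1
        funext k
        simp only [updF_apply]
        split_ifs <;> first | omega | (subst_vars; first | omega | simp_all)
      · have hb' : b ∈ skipFun f t := by
          rcases List.mem_cons.mp hb with h' | h'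
          · exact absurd h' hba
          · exact h'
        rw [List.erase_cons_tail (by simpa using fun h' => hba h'.symm), ih _ hf hb']
        have ha' : ¬ updF f b (f b + 1) a > 0 := by
          simp only [updF, if_neg (fun h' : a = b => hba h'.symm)]; exact h
        rw [skipFun, if_neg ha']

lemma loop_equiv (attrs_a : List (List String)) (bs : List (List String))
    (tp fp ac : List (List String)) (rem matched : PySem.Dict (List String) Int)
    (hnn : ∀ k, 0 ≤ matched.getD k 0)
    (hrem : ∀ k, rem.getD k 0 = (attrs_a.count k : Int) - matched.getD k 0)
    (hac : ac = skipFun (fun k => matched.getD k 0) attrs_a) :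
    (bs.foldl
      (fun (st : List (List String) × List (List String) × List (List String)) b =>
        if b ∈ st.2.2 then (st.1 ++ [b], st.2.1, st.2.2.erase b)
        else (st.1, st.2.1 ++ [b], st.2.2)) (tp, fp, ac)).1
      = (bs.foldl
      (fun (st : List (List String) × List (List String) × PySem.Dict (List String) Int × PySem.Dict (List String) Int) b =>
        if st.2.2.1.getD b 0 > 0 then
          (st.1 ++ [b], st.2.1, st.2.2.1.insert b (st.2.2.1.getD b 0 - 1),
            st.2.2.2.insert b (st.2.2.2.getD b 0 + 1))
        else (st.1, st.2.1 ++ [b], st.2.2.1, st.2.2.2)) (tp, fp, rem, matched)).1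
    ∧ (bs.foldl
      (fun (st : List (List String) × List (List String) × List (List String)) b =>
        if b ∈ st.2.2 then (st.1 ++ [b], st.2.1, st.2.2.erase b)
        else (st.1, st.2.1 ++ [b], st.2.2)) (tp, fp, ac)).2.1
      = (bs.foldl
      (fun (st : List (List String) × List (List String) × PySem.Dict (List String) Int × PySem.Dict (List String) Int) b =>
        if st.2.2.1.getD b 0 > 0 then
          (st.1 ++ [b], st.2.1, st.2.2.1.insert b (st.2.2.1.getD b 0 - 1),
            st.2.2.2.insert b (st.2.2.2.getD b 0 + 1))
        else (st.1, st.2.1 ++ [b], st.2.2.1, st.2.2.2)) (tp, fp, rem, matched)).2.1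
    ∧ (bs.foldl
      (fun (st : List (List String) × List (List String) × List (List String)) b =>
        if b ∈ st.2.2 then (st.1 ++ [b], st.2.1, st.2.2.erase b)
        else (st.1, st.2.1 ++ [b], st.2.2)) (tp, fp, ac)).2.2
      = skipFun (fun k => ((bs.foldl
      (fun (st : List (List String) × List (List String) × PySem.Dict (List String) Int × PySem.Dict (List String) Int) b =>
        if st.2.2.1.getD b 0 > 0 then
          (st.1 ++ [b], st.2.1, st.2.2.1.insert b (st.2.2.1.getD b 0 - 1),
            st.2.2.2.insert b (st.2.2.2.getD b 0 + 1))
        else (st.1, st.2.1 ++ [b], st.2.2.1, st.2.2.2)) (tp, fp, rem, matched)).2.2.2).getD k 0)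
        attrs_a := by
  induction bs generalizing tp fp ac rem matched with
  | nil => exact ⟨rfl, rfl, hac⟩
  | cons b bs ih =>
    have hmem : b ∈ ac ↔ rem.getD b 0 > 0 := by
      rw [hac, mem_skipFun _ _ hnn b]
      have := hrem b
      omega
    by_cases hb : rem.getD b 0 > 0
    · have hbin : b ∈ ac := hmem.mpr hb
      simp only [List.foldl_cons, if_pos hbin, if_pos hb]
      apply ih
      · intro k
        simp only [PySem.Dict.getD_insert]
        split
        · have := hnn b; omega
        · exact hnn k
      · intro k
        simp only [PySem.Dict.getD_insert]
        split_ifs with hkb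
        · have h1 := hrem b
          subst hkb
          omega
        · exact hrem k
      · rw [hac, erase_skipFun _ _ hnn b (hac ▸ hbin), getD_insert_fun]
    · have hbout : ¬ b ∈ ac := fun h => hb (hmem.mp h)
      simp only [List.foldl_cons, if_neg hbout, if_neg hb]
      exact ih _ _ _ _ _ hnn hrem hac

-- ===== VERDICT (by name: the statement is the Claim_ definition above) =====
theorem get_matching_attrs_spec : Claim_equal_get_matching_attrs := by
  intro attrs_a attrs_b _
  unfold Spec_get_matching_attrs
  simp only [get_matching_attrs, get_matching_attrs_alt]
  have hrem : ∀ k,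
      (attrs_a.foldl (fun d a => d.insert a (d.getD a 0 + 1)) PySem.Dict.empty).getD k 0
        = (attrs_a.count k : Int) - (PySem.Dict.empty : PySem.Dict (List String) Int).getD k 0 := by
    intro k
    simp [PySem.Dict.getD_foldl_insert_add_one, PySem.Dict.getD_empty]
  have hnn : ∀ k, 0 ≤ (PySem.Dict.empty : PySem.Dict (List String) Int).getD k 0 := by
    intro k; simp [PySem.Dict.getD_empty]
  have hac : attrs_a
      = skipFun (fun k => (PySem.Dict.empty : PySem.Dict (List String) Int).getD k 0) attrs_a := by
    rw [skipFun_nonpos]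
    intro k; simp [PySem.Dict.getD_empty]
  obtain ⟨e1, e2, e3⟩ := loop_equiv attrs_a attrs_b [] [] attrs_a
    (attrs_a.foldl (fun d a => d.insert a (d.getD a 0 + 1)) PySem.Dict.empty)
    PySem.Dict.empty hnn hrem hac
  rw [skip_foldl, e1, e2, e3]
  simp
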